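-- pv_equiv track=rewrite | github.com/injetiharsha/Fact-Lens | pipeline/evidence/core/gatherer.py | _parse_stage_order
-- ===== SOURCE A (Python) =====
-- from typing import Any, Dict, List, Optional, Set, Tuple
--
-- def _parse_stage_order(raw: str) -> List[str]:
--     allowed = {"structured_api", "web_search", "scraping"}
--     out: List[str] = []
--     for tok in str(raw or "").split(","):
--         stage = tok.strip().lower()
--         if stage in allowed and stage not in out:
--             out.append(stage)
--     if not out:
--         out = ["structured_api", "web_search", "scraping"]
--     for stage in ["structured_api", "web_search", "scraping"]:
--         if stage not in out:
--             out.append(stage)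
--     return out
-- ===== SOURCE B (Python) =====
-- def _parse_stage_order(raw):
--     canonical = ["structured_api", "web_search", "scraping"]
--     toks = [t.strip().lower() for t in str(raw or "").split(",")]
--     first = {}
--     for i, t in enumerate(toks):
--         if t in canonical and t not in first:
--             first[t] = i
--     sentinel = len(toks)
--     return sorted(canonical, key=lambda s: first.get(s, sentinel))
-- ===== Notes on version B (the rewrite author's own statement) =====
-- stated objective: alternative
-- what changed: A builds the result by an ordered-dedup append loop plus an empty-input fallback plus a second append-missing loop; B instead records each allowed stage's first-occurrence index in a dict in one pass and returns one stable sort of the canonical 3-stage list keyed by that index (absent stages get a sentinel), which subsumes both the fallback and the append-missing pass.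
import Mathlib
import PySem

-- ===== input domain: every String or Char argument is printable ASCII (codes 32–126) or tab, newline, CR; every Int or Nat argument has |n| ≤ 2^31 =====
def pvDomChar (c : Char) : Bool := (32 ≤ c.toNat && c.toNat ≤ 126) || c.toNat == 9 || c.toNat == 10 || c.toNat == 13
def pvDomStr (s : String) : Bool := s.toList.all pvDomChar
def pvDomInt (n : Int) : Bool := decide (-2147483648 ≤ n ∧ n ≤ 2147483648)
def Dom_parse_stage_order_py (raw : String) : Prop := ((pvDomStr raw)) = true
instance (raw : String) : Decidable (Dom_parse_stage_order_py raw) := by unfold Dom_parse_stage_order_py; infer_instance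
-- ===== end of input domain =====

-- B replaces A's dedup-loop-plus-fallback-plus-append with a first-occurrence-index dict and one stable sort of
-- the canonical stage list (alternative decomposition, same cost).


-- ===== PORT A =====
def parse_stage_order_py (raw : String) : List String :=
  -- allowed = {"structured_api","web_search","scraping"} : a literal set of three distinct strings,
  -- used only for membership tests, so a 3-element list is its exact PySem.Set representation.
  let allowed : List String := ["structured_api", "web_search", "scraping"]
  -- str(raw or "") : raw if raw ≠ "" else ""; str() of a str is the identity
  -- sep "," ≠ "" so PySem.Str.split? is always `some` (exact; .getD [] is never taken)
  let toks := (PySem.Str.split? (if raw = "" then "" else raw) ",").getD []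
  let out := toks.foldl (fun out tok =>
      let stage := PySem.Str.lower (PySem.Str.strip tok)
      if stage ∈ allowed ∧ stage ∉ out then out ++ [stage] else out) ([] : List String)
  let out := if out = [] then ["structured_api", "web_search", "scraping"] else out
  ["structured_api", "web_search", "scraping"].foldl
    (fun out stage => if stage ∉ out then out ++ [stage] else out) out

-- ===== PORT B =====
def parse_stage_order_py_alt (raw : String) : List String :=
  let canonical : List String := ["structured_api", "web_search", "scraping"]
  -- sep "," ≠ "" so PySem.Str.split? is always `some` (exact; .getD [] is never taken)
  let toks := ((PySem.Str.split? (if raw = "" then "" else raw) ",").getD []).map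
      (fun t => PySem.Str.lower (PySem.Str.strip t))
  let first := (PySem.List.enumerate toks).foldl
      (fun d p => if p.2 ∈ canonical ∧ d.contains p.2 = false then d.insert p.2 p.1 else d)
      (PySem.Dict.empty : PySem.Dict String Int)
  let sentinel : Int := toks.length
  PySem.List.sorted canonical (fun s => first.getD s sentinel) false

-- ===== PRECONDITION & SPEC =====
def Spec_parse_stage_order_py (raw : String) (out : List String) : Prop := out = parse_stage_order_py_alt raw
instance (raw : String) (out : List String) : Decidable (Spec_parse_stage_order_py raw out) := by unfold Spec_parse_stage_order_py; infer_instance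

-- ===== CLAIM (what is proved, stated in full; the proofs are below) =====
def Claim_equal_parse_stage_order_py : Prop := ∀ (raw : String), Dom_parse_stage_order_py raw → Spec_parse_stage_order_py raw (parse_stage_order_py raw)

-- ===== LEMMAS AND PROOFS =====
def pvCanon : List String := ["structured_api", "web_search", "scraping"]
def pvNorm (t : String) : String := PySem.Str.lower (PySem.Str.strip t)
def pvAStep (out : List String) (stage : String) : List String :=
  if stage ∈ pvCanon ∧ stage ∉ out then out ++ [stage] else out
def pvBStep (d : PySem.Dict String Int) (p : Int × String) : PySem.Dict String Int :=
  if p.2 ∈ pvCanon ∧ d.contains p.2 = false then d.insert p.2 p.1 else d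

lemma pv_contains_false_iff (d : PySem.Dict String Int) (s : String) :
    d.contains s = false ↔ s ∉ d.items.map Prod.fst := by
  simp [PySem.Dict.contains, List.mem_map]
  constructor
  · intro h x hx; exact h s x hx rfl
  · intro h a b hab has; subst has; exact h b hab

lemma pv_insert_items (d : PySem.Dict String Int) (k : String) (v : Int)
    (h : d.contains k = false) : (d.insert k v).items = d.items ++ [(k, v)] := by
  simp [PySem.Dict.insert, h]

lemma pv_inv (L : List String) (i : Int) (d : PySem.Dict String Int)
    (hc : ∀ s ∈ d.items.map Prod.fst, s ∈ pvCanon)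
    (hnd : (d.items.map Prod.fst).Nodup)
    (hlt : ∀ p ∈ d.items, p.2 < i)
    (hinc : d.items.Pairwise (fun p q => p.2 < q.2)) :
    ((PySem.List.enumerate L i).foldl pvBStep d).items.map Prod.fst
        = L.foldl pvAStep (d.items.map Prod.fst)
    ∧ (∀ s ∈ ((PySem.List.enumerate L i).foldl pvBStep d).items.map Prod.fst, s ∈ pvCanon)
    ∧ (((PySem.List.enumerate L i).foldl pvBStep d).items.map Prod.fst).Nodup
    ∧ (∀ p ∈ ((PySem.List.enumerate L i).foldl pvBStep d).items, p.2 < i + L.length)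
    ∧ ((PySem.List.enumerate L i).foldl pvBStep d).items.Pairwise (fun p q => p.2 < q.2) := by
  induction L generalizing i d with
  | nil =>
    rw [PySem.List.enumerate_nil]
    refine ⟨rfl, hc, hnd, ?_, hinc⟩
    intro p hp; have := hlt p hp; simp only [List.length_nil]; omega
  | cons t L ih =>
    rw [PySem.List.enumerate_cons]
    simp only [List.foldl_cons]
    by_cases ht : t ∈ pvCanon ∧ t ∉ d.items.map Prod.fst
    · have hcf : d.contains t = false := (pv_contains_false_iff d t).mpr ht.2
      have hstep : pvBStep d (i, t) = PySem.Dict.mk (d.items ++ [(t, i)]) := by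
        simp only [pvBStep, ht.1, hcf]
        simp [pv_insert_items d t i hcf, PySem.Dict.ext_iff]
      have hastep : pvAStep (d.items.map Prod.fst) t = d.items.map Prod.fst ++ [t] := by
        simp [pvAStep, ht.1, ht.2]
      rw [hstep, hastep]
      have hitems : (PySem.Dict.mk (d.items ++ [(t, i)])).items = d.items ++ [(t, i)] := rfl
      obtain ⟨g1, g2, g3, g4, g5⟩ := ih (i + 1) (PySem.Dict.mk (d.items ++ [(t, i)]))
        (by rw [hitems, List.map_append]
            intro s hs
            rcases List.mem_append.mp hs with h | h
            · exact hc s h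
            · simp at h; subst h; exact ht.1)
        (by rw [hitems, List.map_append]
            refine List.Nodup.append hnd (by simp) ?_
            intro a ha hb; simp at hb; subst hb; exact ht.2 ha)
        (by rw [hitems]
            intro p hp
            rcases List.mem_append.mp hp with h | h
            · have := hlt p h; omega
            · simp at h; rw [h]; omega)
        (by rw [hitems, List.pairwise_append]
            refine ⟨hinc, by simp, ?_⟩
            intro p hp q hq; simp at hq; rw [hq]; exact hlt p hp)
      rw [hitems, List.map_append] at g1
      refine ⟨g1, g2, g3, ?_, g5⟩
      intro p hp; have := g4 p hp
      simp only [List.length_cons] at this ⊢; push_cast at this ⊢; omega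
    · have hB : pvBStep d (i, t) = d := by
        simp only [pvBStep]
        rw [if_neg]
        intro hx
        exact ht ⟨hx.1, (pv_contains_false_iff d t).mp hx.2⟩
      have hA : pvAStep (d.items.map Prod.fst) t = d.items.map Prod.fst := by
        simp only [pvAStep]; rw [if_neg ht]
      rw [hB, hA]
      obtain ⟨g1, g2, g3, g4, g5⟩ := ih (i + 1) d hc hnd
        (by intro p hp; have := hlt p hp; omega) hinc
      refine ⟨g1, g2, g3, ?_, g5⟩
      intro p hp; have := g4 p hp
      simp only [List.length_cons] at this ⊢; push_cast at this ⊢; omega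


lemma pv_sorted3 (key : String → Int) :
    PySem.List.sorted pvCanon key false =
      if key "web_search" < key "structured_api" then
        (if key "scraping" < key "web_search" then ["scraping", "web_search", "structured_api"]
         else if key "scraping" < key "structured_api" then ["web_search", "scraping", "structured_api"]
         else ["web_search", "structured_api", "scraping"])
      else
        (if key "scraping" < key "structured_api" then ["scraping", "structured_api", "web_search"]
         else if key "scraping" < key "web_search" then ["structured_api", "scraping", "web_search"]
         else ["structured_api", "web_search", "scraping"]) := by
  simp only [PySem.List.sorted, pvCanon, List.foldl, PySem.List.insertBy]
  split_ifs <;> simp_all [PySem.List.insertBy] <;> split_ifs <;> simp_all <;> omega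

set_option maxHeartbeats 1000000 in
lemma pv_final (d : PySem.Dict String Int) (sentinel : Int)
    (hc : ∀ s ∈ d.items.map Prod.fst, s ∈ pvCanon)
    (hnd : (d.items.map Prod.fst).Nodup)
    (hlt : ∀ p ∈ d.items, p.2 < sentinel)
    (hinc : d.items.Pairwise (fun p q => p.2 < q.2)) :
    pvCanon.foldl (fun out stage => if stage ∉ out then out ++ [stage] else out)
      (if d.items.map Prod.fst = [] then pvCanon else d.items.map Prod.fst)
    = PySem.List.sorted pvCanon (fun s => d.getD s sentinel) false := by
  obtain ⟨items⟩ := d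
  rcases items with _ | ⟨⟨k1, v1⟩, _ | ⟨⟨k2, v2⟩, _ | ⟨⟨k3, v3⟩, _ | ⟨⟨k4, v4⟩, rest⟩⟩⟩⟩
  · rw [pv_sorted3]
    simp [PySem.Dict.getD, PySem.Dict.get?, List.find?, pvCanon]
  · -- one key
    have m1 : k1 ∈ pvCanon := hc k1 (by simp)
    have l1 : v1 < sentinel := hlt (k1, v1) (by simp)
    simp only [pvCanon, List.mem_cons] at m1
    rcases m1 with rfl | rfl | (rfl | h) <;> try cases h
    all_goals
      (rw [pv_sorted3]
       simp [PySem.Dict.getD, PySem.Dict.get?, List.find?, pvCanon]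
       try (split_ifs <;> first | rfl | omega | simp_all))
  · -- two keys
    have m1 : k1 ∈ pvCanon := hc k1 (by simp)
    have m2 : k2 ∈ pvCanon := hc k2 (by simp)
    have l1 : v1 < sentinel := hlt (k1, v1) (by simp)
    have l2 : v2 < sentinel := hlt (k2, v2) (by simp)
    obtain ⟨h12, -⟩ := List.pairwise_cons.mp hinc
    have o12 : v1 < v2 := by simpa using h12 (k2, v2) (by simp)
    have ne12 : k1 ≠ k2 := by simpa using hnd
    simp only [pvCanon, List.mem_cons] at m1 m2
    rcases m1 with rfl | rfl | (rfl | h) <;> try cases h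
    all_goals rcases m2 with rfl | rfl | (rfl | h) <;> try cases h
    all_goals first
      | exact absurd rfl ne12
      | (rw [pv_sorted3]
         simp [PySem.Dict.getD, PySem.Dict.get?, List.find?, pvCanon]
         try (split_ifs <;> first | rfl | omega | simp_all)
         done)
  · -- three keys
    have m1 : k1 ∈ pvCanon := hc k1 (by simp)
    have m2 : k2 ∈ pvCanon := hc k2 (by simp)
    have m3 : k3 ∈ pvCanon := hc k3 (by simp)
    have l1 : v1 < sentinel := hlt (k1, v1) (by simp)
    have l2 : v2 < sentinel := hlt (k2, v2) (by simp)
    have l3 : v3 < sentinel := hlt (k3, v3) (by simp)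
    obtain ⟨h12, h2⟩ := List.pairwise_cons.mp hinc
    obtain ⟨h23, -⟩ := List.pairwise_cons.mp h2
    have o12 : v1 < v2 := by simpa using h12 (k2, v2) (by simp)
    have o13 : v1 < v3 := by simpa using h12 (k3, v3) (by simp)
    have o23 : v2 < v3 := by simpa using h23 (k3, v3) (by simp)
    simp only [List.map_cons, List.map_nil] at hnd
    obtain ⟨a1, h2'⟩ := List.pairwise_cons.mp hnd
    obtain ⟨a2, -⟩ := List.pairwise_cons.mp h2'
    have d12 : k1 ≠ k2 := a1 k2 (by simp)
    have d13 : k1 ≠ k3 := a1 k3 (by simp)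
    have d23 : k2 ≠ k3 := a2 k3 (by simp)
    simp only [pvCanon, List.mem_cons] at m1 m2 m3
    clear hc hlt hinc hnd h12 h2 h23 a1 h2' a2
    rcases m1 with rfl | rfl | (rfl | h) <;> try cases h
    all_goals rcases m2 with rfl | rfl | (rfl | h) <;> try cases h
    all_goals rcases m3 with rfl | rfl | (rfl | h) <;> try cases h
    all_goals first
      | exact absurd rfl d12
      | exact absurd rfl d13
      | exact absurd rfl d23
      | (rw [pv_sorted3]
         simp [PySem.Dict.getD, PySem.Dict.get?, List.find?, pvCanon]
         try (split_ifs <;> first | rfl | omega | simp_all)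
         done)
  · -- four or more keys: impossible (only three allowed stages, keys distinct)
    exfalso
    have m1 : k1 ∈ pvCanon := hc k1 (by simp)
    have m2 : k2 ∈ pvCanon := hc k2 (by simp)
    have m3 : k3 ∈ pvCanon := hc k3 (by simp)
    have m4 : k4 ∈ pvCanon := hc k4 (by simp)
    simp only [List.map_cons] at hnd
    obtain ⟨a1, h2⟩ := List.pairwise_cons.mp hnd
    obtain ⟨a2, h3⟩ := List.pairwise_cons.mp h2
    obtain ⟨a3, -⟩ := List.pairwise_cons.mp h3
    have d12 : k1 ≠ k2 := a1 k2 (by simp)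
    have d13 : k1 ≠ k3 := a1 k3 (by simp)
    have d14 : k1 ≠ k4 := a1 k4 (by simp)
    have d23 : k2 ≠ k3 := a2 k3 (by simp)
    have d24 : k2 ≠ k4 := a2 k4 (by simp)
    have d34 : k3 ≠ k4 := a3 k4 (by simp)
    simp only [pvCanon, List.mem_cons] at m1 m2 m3 m4
    clear hc hnd hlt hinc a1 a2 a3 h2 h3
    rcases m1 with rfl | rfl | (rfl | h) <;> try cases h
    all_goals rcases m2 with rfl | rfl | (rfl | h) <;> try cases h
    all_goals first
      | exact absurd rfl d12
      | (rcases m3 with rfl | rfl | (rfl | h) <;> try cases h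
         all_goals first
           | exact absurd rfl d13
           | exact absurd rfl d23
           | (rcases m4 with rfl | rfl | (rfl | h) <;> try cases h
              all_goals first
                | exact absurd rfl d14
                | exact absurd rfl d24
                | exact absurd rfl d34))

lemma pv_main (t0 : List String) :
    pvCanon.foldl (fun out stage => if stage ∉ out then out ++ [stage] else out)
      (if t0.foldl (fun out tok => pvAStep out (pvNorm tok)) [] = [] then pvCanon
       else t0.foldl (fun out tok => pvAStep out (pvNorm tok)) []) =
    PySem.List.sorted pvCanon
      (fun s => ((PySem.List.enumerate (t0.map pvNorm)).foldl pvBStep PySem.Dict.empty).getD s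
        ((t0.map pvNorm).length : Int)) false := by
  obtain ⟨g1, g2, g3, g4, g5⟩ := pv_inv (t0.map pvNorm) 0 PySem.Dict.empty
    (by simp [PySem.Dict.empty]) (by simp [PySem.Dict.empty])
    (by simp [PySem.Dict.empty]) (by simp [PySem.Dict.empty])
  rw [List.foldl_map,
    show (List.map Prod.fst (PySem.Dict.empty : PySem.Dict String Int).items) = [] from rfl] at g1
  rw [← g1]
  exact pv_final _ _ g2 g3 (by intro p hp; have := g4 p hp; omega) g5


-- ===== VERDICT (by name: the statement is the Claim_ definition above) =====
theorem parse_stage_order_py_spec : Claim_equal_parse_stage_order_py := by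
  intro raw _
  unfold Spec_parse_stage_order_py
  exact pv_main ((PySem.Str.split? (if raw = "" then "" else raw) ",").getD [])
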